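-- pv_equiv track=rewrite | github.com/HacknBashe/dots | files/local/bin/silverbullet/task-processor.py | find_section_insert_pos
-- ===== SOURCE A (Python) =====
-- def find_section_insert_pos(lines: list[str], section_prefix: str) -> int | None:
--     """
--     Find the insert position at the bottom of a ## section matching section_prefix.
--     Returns the line index to insert before, or None if no matching section found.
--     """
--     prefix_lower = section_prefix.lower()
--     section_start = None
--
--     for i, line in enumerate(lines):
--         if line.startswith('## '):
--             heading_text = line[3:].strip()
--             if section_start is not None:
--                 # We found the next heading after our section — insert before it
--                 # Back up past any trailing blank lines in our section
--                 pos = i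
--                 while pos > section_start and lines[pos - 1].strip() == '':
--                     pos -= 1
--                 return pos
--             if heading_text.lower().startswith(prefix_lower):
--                 section_start = i
--
--     if section_start is not None:
--         # Section runs to end of file — insert before trailing blank lines
--         pos = len(lines)
--         while pos > section_start and lines[pos - 1].strip() == '':
--             pos -= 1
--         return pos
--
--     return None
-- ===== SOURCE B (Python) =====
-- def find_section_insert_pos(lines: list[str], section_prefix: str) -> int | None:
--     """Heading-index approach: precompute the list of all '## ' heading indices,
--     pair each heading with its successor (end-of-file for the last one), then pick
--     the first matching heading and trim its segment's trailing blank lines."""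
--     prefix_lower = section_prefix.lower()
--
--     # Index of every '## ' heading line, built once.
--     headings = [i for i, line in enumerate(lines) if line.startswith('## ')]
--
--     # Each heading paired with the start of the next one (or end of file).
--     for start, end in zip(headings, headings[1:] + [len(lines)]):
--         if lines[start][3:].strip().lower().startswith(prefix_lower):
--             seg = lines[start + 1:end]
--             while seg and seg[-1].strip() == '':
--                 seg.pop()
--             return start + 1 + len(seg)
--     return None
-- ===== Notes on version B (the rewrite author's own statement) =====
-- stated objective: alternative
-- what changed: Replaces A's single stateful pass (an Optional section_start threaded through one loop with an in-loop return and index-decrementing backup) by a precomputed heading-index list: B builds the list of all '## ' line indices once, pairs each heading with its successor via zip (end-of-file for the last), picks the first pair whose heading text matches, and trims trailing blanks by popping from the extracted segment slice instead of walking indices down.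
import Mathlib
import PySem

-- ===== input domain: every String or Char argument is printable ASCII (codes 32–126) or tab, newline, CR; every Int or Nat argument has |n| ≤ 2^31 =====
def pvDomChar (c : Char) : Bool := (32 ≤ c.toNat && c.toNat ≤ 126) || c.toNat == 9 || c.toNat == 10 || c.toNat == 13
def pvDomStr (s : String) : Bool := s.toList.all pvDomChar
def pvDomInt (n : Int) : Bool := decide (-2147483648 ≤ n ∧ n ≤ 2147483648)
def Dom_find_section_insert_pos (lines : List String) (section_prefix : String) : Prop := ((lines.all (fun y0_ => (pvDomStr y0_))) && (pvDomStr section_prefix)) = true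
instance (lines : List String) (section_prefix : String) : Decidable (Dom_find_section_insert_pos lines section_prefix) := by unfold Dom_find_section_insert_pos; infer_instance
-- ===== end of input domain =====

-- B replaces A's single stateful pass by a precomputed heading-index list zipped with its
-- successors, plus segment-pop blank trimming; objective: alternative decomposition, same O(n).

-- ===== PORT A =====
-- A's inner 'while pos > start and lines[pos-1].strip() == "": pos -= 1' loop
def pvBackup (lines : List String) (start : Nat) : Nat → Nat
  | 0 => 0
  | p + 1 =>
      if start < p + 1 ∧ PySem.Str.strip (lines.getD p "") = "" then pvBackup lines start p
      else p + 1

-- A's single 'for i, line in enumerate(lines)' loop carrying section_start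
def pvLoopA (lines : List String) (prefix_lower : String) : List String → Nat → Option Nat → Option Int
  | [], _, start =>
      match start with
      | some s => some ((pvBackup lines s lines.length : Nat) : Int)
      | none => none
  | line :: rest, i, start =>
      if PySem.Str.startswith line "## " then
        let heading := PySem.Str.strip (PySem.Str.slice line (some 3) none)
        match start with
        | some s => some ((pvBackup lines s i : Nat) : Int)
        | none =>
          if PySem.Str.startswith (PySem.Str.lower heading) prefix_lower then
            pvLoopA lines prefix_lower rest (i + 1) (some i)
          else
            pvLoopA lines prefix_lower rest (i + 1) none
      else
        pvLoopA lines prefix_lower rest (i + 1) start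

def find_section_insert_pos (lines : List String) (section_prefix : String) : Option Int :=
  pvLoopA lines (PySem.Str.lower section_prefix) lines 0 none

-- ===== PORT B =====
-- the 'while seg and seg[-1].strip() == "": seg.pop()' loop (pop-from-the-end as structural recursion)
def pvPop : List String → List String
  | [] => []
  | x :: xs =>
      let r := pvPop xs
      if r.isEmpty && PySem.Str.strip x == "" then [] else x :: r

-- the 'for start, end in zip(...)' loop over heading/successor pairs
-- (lines[start] is ported as pyGetD: start is always an in-range heading index)
def pvScanB (lines : List String) (prefix_lower : String) : List (Int × Int) → Option Int
  | [] => none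
  | (s, e) :: rest =>
      if PySem.Str.startswith
           (PySem.Str.lower (PySem.Str.strip
             (PySem.Str.slice (PySem.List.pyGetD lines s "") (some 3) none))) prefix_lower
      then some (s + 1 + ((pvPop (PySem.List.slice lines (some (s + 1)) (some e))).length : Int))
      else pvScanB lines prefix_lower rest

def find_section_insert_pos_alt (lines : List String) (section_prefix : String) : Option Int :=
  let prefix_lower := PySem.Str.lower section_prefix
  let headings :=
    ((PySem.List.enumerate lines).filter (fun p => PySem.Str.startswith p.2 "## ")).map Prod.fst
  pvScanB lines prefix_lower (List.zip headings (headings.drop 1 ++ [(lines.length : Int)]))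

-- ===== PRECONDITION & SPEC =====
def Spec_find_section_insert_pos (lines : List String) (section_prefix : String) (out : Option Int) : Prop := out = find_section_insert_pos_alt lines section_prefix
instance (lines : List String) (section_prefix : String) (out : Option Int) : Decidable (Spec_find_section_insert_pos lines section_prefix out) := by unfold Spec_find_section_insert_pos; infer_instance

-- ===== CLAIM (what is proved, stated in full; the proofs are below) =====
def Claim_equal_find_section_insert_pos : Prop := ∀ (lines : List String) (section_prefix : String), Dom_find_section_insert_pos lines section_prefix → Spec_find_section_insert_pos lines section_prefix (find_section_insert_pos lines section_prefix)

-- ===== LEMMAS AND PROOFS =====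

-- proof-only helpers: the common normal form both programs are reduced to
def pvHL : List String → Nat → List Nat
  | [], _ => []
  | l :: rest, i =>
      if PySem.Str.startswith l "## " then i :: pvHL rest (i + 1) else pvHL rest (i + 1)

def pvFindStart (prefix_lower : String) : List String → Nat → Option Nat
  | [], _ => none
  | line :: rest, i =>
      if PySem.Str.startswith line "## " &&
           PySem.Str.startswith
             (PySem.Str.lower (PySem.Str.strip (PySem.Str.slice line (some 3) none))) prefix_lower
      then some i else pvFindStart prefix_lower rest (i + 1)

def pvFindEnd (dflt : Nat) : List String → Nat → Nat
  | [], _ => dflt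
  | line :: rest, j =>
      if PySem.Str.startswith line "## " then j else pvFindEnd dflt rest (j + 1)

-- ===== A-side lemmas (A = normal form) =====
theorem pvLoopA_some (lines : List String) (p : String) :
    ∀ (rest : List String) (i s : Nat),
      pvLoopA lines p rest i (some s)
        = some ((pvBackup lines s (pvFindEnd lines.length rest i) : Nat) : Int) := by
  intro rest
  induction rest with
  | nil => intro i s; simp [pvLoopA, pvFindEnd]
  | cons line rest ih =>
      intro i s
      by_cases hb : PySem.Chars.startswith line.toList ['#', '#', ' '] = true
      · simp [pvLoopA, pvFindEnd, hb]
      · simp [pvLoopA, pvFindEnd, hb, ih]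

theorem pvLoopA_none (lines : List String) (p : String) :
    ∀ (rest : List String) (i : Nat), rest = lines.drop i →
      pvLoopA lines p rest i none
        = (match pvFindStart p rest i with
           | none => none
           | some s =>
               some ((pvBackup lines s
                        (pvFindEnd lines.length (lines.drop (s + 1)) (s + 1)) : Nat) : Int)) := by
  intro rest
  induction rest with
  | nil => intro i _; simp [pvLoopA, pvFindStart]
  | cons line rest ih =>
      intro i h
      have hrest : rest = lines.drop (i + 1) := by
        have : (line :: rest).tail = (lines.drop i).tail := by rw [h]
        simpa [List.tail_drop] using this
      by_cases hb : PySem.Chars.startswith line.toList ['#', '#', ' '] = true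
      · by_cases hm : PySem.Chars.startswith
            (PySem.Chars.lower (PySem.Chars.strip (PySem.List.slice line.toList (some 3) none)))
            p.toList = true
        · simp [pvLoopA, pvFindStart, hb, hm, pvLoopA_some, hrest]
        · simp [pvLoopA, pvFindStart, hb, hm, ih (i + 1) hrest]
      · simp [pvLoopA, pvFindStart, hb, ih (i + 1) hrest]

-- ===== B-side lemmas (B = normal form) =====

-- the heading-index comprehension is pvHL
theorem pvEnum_filter (rest : List String) :
    ∀ (i : Nat),
      ((PySem.List.enumerate rest (i : Int)).filter
          (fun p => PySem.Str.startswith p.2 "## ")).map Prod.fst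
        = (pvHL rest i).map (fun n : Nat => (n : Int)) := by
  induction rest with
  | nil => intro i; simp [PySem.List.enumerate, pvHL]
  | cons l rest ih =>
      intro i
      have h1 : ((i : Int) + 1) = ((i + 1 : Nat) : Int) := by push_cast; ring
      rw [PySem.List.enumerate_cons, h1]
      by_cases hb : PySem.Chars.startswith l.toList ['#', '#', ' '] = true
      · simpa [pvHL, hb, List.filter_cons] using ih (i + 1)
      · simpa [pvHL, hb, List.filter_cons] using ih (i + 1)

-- head of the heading list (default L) is pvFindEnd
theorem pvHL_headD (L : Nat) (rest : List String) :
    ∀ (j : Nat), (pvHL rest j).headD L = pvFindEnd L rest j := by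
  induction rest with
  | nil => intro j; simp [pvHL, pvFindEnd]
  | cons l rest ih =>
      intro j
      by_cases hb : PySem.Chars.startswith l.toList ['#', '#', ' '] = true
      · simp [pvHL, pvFindEnd, hb]
      · simpa [pvHL, pvFindEnd, hb] using ih (j + 1)

theorem pvFindEnd_bounds (L : Nat) (rest : List String) :
    ∀ (j : Nat), j + rest.length ≤ L → j ≤ pvFindEnd L rest j ∧ pvFindEnd L rest j ≤ L := by
  induction rest with
  | nil => intro j h; simp [pvFindEnd]; omega
  | cons l rest ih =>
      intro j h
      by_cases hb : PySem.Chars.startswith l.toList ['#', '#', ' '] = true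
      · simp [pvFindEnd, hb]; simp at h; omega
      · simp only [pvFindEnd]
        rw [if_neg (by simpa using hb)]
        have := ih (j + 1) (by simp at h ⊢; omega)
        omega

-- a '## ' heading does not strip to the empty string
theorem pvHeading_nonblank (l : String)
    (hb : PySem.Chars.startswith l.toList ['#', '#', ' '] = true) :
    ¬ PySem.Str.strip l = "" := by
  intro h
  have hs : PySem.Chars.strip l.toList = [] := by
    have := congrArg String.toList h
    simpa using this
  have hpre : ['#', '#', ' '] <+: l.toList := (PySem.Chars.startswith_iff _ _).mp hb
  obtain ⟨u, hu⟩ := hpre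
  have hns : PySem.Chars.isspace '#' = false := by decide
  unfold PySem.Chars.strip PySem.Chars.rstrip PySem.Chars.lstrip at hs
  rw [← hu] at hs
  simp only [List.cons_append, List.nil_append] at hs
  rw [List.dropWhile_cons, hns] at hs
  simp only [Bool.false_eq_true, if_false, List.reverse_eq_nil_iff,
    List.dropWhile_eq_nil_iff] at hs
  have hmem : '#' ∈ ('#' :: '#' :: ' ' :: u).reverse := by simp
  have := hs _ hmem
  rw [hns] at this
  exact Bool.false_ne_true this

-- pop-from-the-end on an appended element
theorem pvPop_append (xs : List String) (x : String) :
    pvPop (xs ++ [x]) = if PySem.Str.strip x = "" then pvPop xs else xs ++ [x] := by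
  induction xs with
  | nil => by_cases h : PySem.Str.strip x = "" <;> simp [pvPop, h]
  | cons y xs ih =>
      by_cases h : PySem.Str.strip x = ""
      · simp [pvPop, h] at ih ⊢; rw [ih]
      · simp only [pvPop, List.cons_append, ih, if_neg h]
        simp

-- the index-decrementing backup equals segment-pop trimming
theorem pvBackup_eq_pop (lines : List String) (s : Nat)
    (hnb : ¬ PySem.Str.strip (lines.getD s "") = "") :
    ∀ (E : Nat), s + 1 ≤ E → E ≤ lines.length →
      ((pvBackup lines s E : Nat) : Int)
        = (s : Int) + 1
            + ((pvPop (PySem.List.slice lines (some ((s : Int) + 1)) (some (E : Int)))).length : Int) := by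
  have hstep : ∀ q, pvBackup lines s (q + 1)
      = if s < q + 1 ∧ PySem.Str.strip (lines.getD q "") = "" then pvBackup lines s q
        else q + 1 := fun q => rfl
  have hcast : ((s : Int) + 1) = ((s + 1 : Nat) : Int) := by push_cast; ring
  intro E hE
  induction E, hE using Nat.le_induction with
  | base =>
      intro _
      rw [hcast, PySem.List.slice_natCast, hstep s,
        if_neg (fun hcon => hnb hcon.2)]
      simp [pvPop]
  | succ p hp ih =>
      intro hlen
      have hplt : p < lines.length := by omega
      have hsl1 : PySem.List.slice lines (some ((s : Int) + 1)) (some ((p + 1 : Nat) : Int))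
          = PySem.List.slice lines (some ((s : Int) + 1)) (some ((p : Nat) : Int))
              ++ [lines.getD p ""] := by
        rw [hcast, PySem.List.slice_natCast, PySem.List.slice_natCast]
        have h1 : p + 1 - (s + 1) = (p - (s + 1)) + 1 := by omega
        rw [h1, List.take_add_one, List.getElem?_drop]
        have h2 : s + 1 + (p - (s + 1)) = p := by omega
        rw [h2, List.getElem?_eq_getElem hplt]
        simp [List.getD_eq_getElem?_getD, List.getElem?_eq_getElem hplt]
      by_cases hbl : PySem.Str.strip (lines.getD p "") = ""
      · rw [hstep p, if_pos ⟨by omega, hbl⟩, ih (by omega), hsl1, pvPop_append, if_pos hbl]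
      · rw [hstep p, if_neg (fun hcon => hbl hcon.2), hsl1, pvPop_append, if_neg hbl]
        have hlenslice :
            (PySem.List.slice lines (some ((s : Int) + 1)) (some ((p : Nat) : Int))).length
              = p - (s + 1) := by
          rw [hcast, PySem.List.slice_natCast]
          simp only [List.length_take, List.length_drop]
          omega
        simp only [List.length_append, hlenslice, List.length_cons, List.length_nil]
        push_cast
        omega

-- B's zip-scan over pvHL equals the normal form
theorem pvScanB_eq (lines : List String) (p : String) :
    ∀ (rest : List String) (i : Nat), rest = lines.drop i →
      pvScanB lines p
          (List.zip ((pvHL rest i).map (fun n : Nat => (n : Int)))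
            (((pvHL rest i).drop 1).map (fun n : Nat => (n : Int)) ++ [(lines.length : Int)]))
        = (match pvFindStart p rest i with
           | none => none
           | some s =>
               some ((pvBackup lines s
                        (pvFindEnd lines.length (lines.drop (s + 1)) (s + 1)) : Nat) : Int)) := by
  have hscan : ∀ (s e : Int) (rest' : List (Int × Int)),
      pvScanB lines p ((s, e) :: rest')
        = if PySem.Str.startswith
              (PySem.Str.lower (PySem.Str.strip
                (PySem.Str.slice (PySem.List.pyGetD lines s "") (some 3) none))) p
          then some (s + 1 + ((pvPop (PySem.List.slice lines (some (s + 1)) (some e))).length : Int))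
          else pvScanB lines p rest' := fun _ _ _ => rfl
  intro rest
  induction rest with
  | nil => intro i _; simp [pvHL, pvFindStart, pvScanB]
  | cons l rest ih =>
      intro i h
      have hrest : rest = lines.drop (i + 1) := by
        have : (l :: rest).tail = (lines.drop i).tail := by rw [h]
        simpa [List.tail_drop] using this
      have hilt : i < lines.length := by
        have hl := congrArg List.length h
        simp [List.length_drop] at hl
        omega
      have h0 : lines[i]? = some l := by
        have := congrArg (fun t => t.head?) h
        simpa [List.head?_drop] using this.symm
      have hget : lines.getD i "" = l := by
        rw [List.getD_eq_getElem?_getD, h0]; rfl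
      have hcond : PySem.Str.startswith
          (PySem.Str.lower (PySem.Str.strip
            (PySem.Str.slice (PySem.List.pyGetD lines ((i : Nat) : Int) "") (some 3) none))) p
        = PySem.Chars.startswith
            (PySem.Chars.lower (PySem.Chars.strip (PySem.List.slice l.toList (some 3) none)))
            p.toList := by
        simp [h0]
      by_cases hb : PySem.Chars.startswith l.toList ['#', '#', ' '] = true
      · -- l is a heading: it heads the zip list
        have hHL : pvHL (l :: rest) i = i :: pvHL rest (i + 1) := by simp [pvHL, hb]
        have hFS : pvFindStart p (l :: rest) i
            = (if PySem.Chars.startswith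
                  (PySem.Chars.lower (PySem.Chars.strip (PySem.List.slice l.toList (some 3) none)))
                  p.toList = true
               then some i else pvFindStart p rest (i + 1)) := by
          simp [pvFindStart, hb]
        have hend := pvHL_headD lines.length rest (i + 1)
        rw [hHL, hFS]
        simp only [List.map_cons, List.drop_one, List.tail_cons]
        by_cases hm : PySem.Chars.startswith
            (PySem.Chars.lower (PySem.Chars.strip (PySem.List.slice l.toList (some 3) none)))
            p.toList = true
        · -- matching heading: B returns at this pair; use pvBackup_eq_pop
          have hsimp : (match (some i : Option Nat) with
              | none => (none : Option Int)
              | some s => some ((pvBackup lines s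
                  (pvFindEnd lines.length (lines.drop (s + 1)) (s + 1)) : Nat) : Int))
              = some ((pvBackup lines i
                  (pvFindEnd lines.length (lines.drop (i + 1)) (i + 1)) : Nat) : Int) := rfl
          rw [if_pos hm, hsimp, ← hrest]
          have hElo : i + 1 ≤ pvFindEnd lines.length rest (i + 1) ∧
              pvFindEnd lines.length rest (i + 1) ≤ lines.length := by
            apply pvFindEnd_bounds
            rw [hrest]; simp; omega
          have hnb : ¬ PySem.Str.strip (lines.getD i "") = "" := by
            rw [hget]; exact pvHeading_nonblank l hb
          have hbp := pvBackup_eq_pop lines i hnb (pvFindEnd lines.length rest (i + 1))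
            hElo.1 hElo.2
          cases hh : pvHL rest (i + 1) with
          | nil =>
              have hendL : pvFindEnd lines.length rest (i + 1) = lines.length := by
                rw [← hend, hh]; rfl
              rw [hendL] at hbp
              simp only [List.map_nil, List.nil_append, List.zip_cons_cons, List.zip_nil_left]
              rw [hscan, hcond, if_pos hm, hendL]
              exact congrArg some hbp.symm
              
          | cons h0 t =>
              have hendH : pvFindEnd lines.length rest (i + 1) = h0 := by
                rw [← hend, hh]; rfl
              rw [hendH] at hbp
              simp only [List.map_cons, List.cons_append, List.zip_cons_cons]
              rw [hscan, hcond, if_pos hm, hendH]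
              exact congrArg some hbp.symm
        · -- non-matching heading: skip this pair, recurse
          rw [if_neg hm]
          have ihr := ih (i + 1) hrest
          cases hh : pvHL rest (i + 1) with
          | nil =>
              simp only [List.map_nil, List.nil_append, List.zip_cons_cons, List.zip_nil_left]
              rw [hscan, hcond, if_neg hm]
              rw [hh] at ihr
              simpa [pvScanB] using ihr
          | cons h0 t =>
              simp only [List.map_cons, List.cons_append, List.zip_cons_cons]
              rw [hscan, hcond, if_neg hm]
              rw [hh] at ihr
              simp only [List.map_cons, List.drop_one, List.tail_cons] at ihr
              exact ihr
      · -- not a heading: both sides skip l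
        have hHL : pvHL (l :: rest) i = pvHL rest (i + 1) := by simp [pvHL, hb]
        have hFS : pvFindStart p (l :: rest) i = pvFindStart p rest (i + 1) := by
          simp [pvFindStart, hb]
        rw [hHL, hFS]
        exact ih (i + 1) hrest

-- ===== VERDICT (by name: the statement is the Claim_ definition above) =====
theorem find_section_insert_pos_spec : Claim_equal_find_section_insert_pos := by
  intro lines section_prefix _
  unfold Spec_find_section_insert_pos find_section_insert_pos find_section_insert_pos_alt
  rw [pvLoopA_none lines (PySem.Str.lower section_prefix) lines 0 (by simp)]
  have he : ((PySem.List.enumerate lines (0 : Int)).filter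
      (fun p => PySem.Str.startswith p.2 "## ")).map Prod.fst
        = (pvHL lines 0).map (fun n : Nat => (n : Int)) := by
    have := pvEnum_filter lines 0
    simpa using this
  simp only [he, ← List.map_drop]
  rw [pvScanB_eq lines (PySem.Str.lower section_prefix) lines 0 (by simp)]
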